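-- pv_equiv track=rewrite | github.com/MrBrantCode/unitest_baseline | mut_generate/mist_train_taco/taco_8442/solution.py | max_batting_score_ways
-- ===== SOURCE A (Python) =====
-- import math
--
-- def max_batting_score_ways(scores, K):
--     # Sort the scores in descending order
--     scores.sort(reverse=True)
--
--     # Get the K-th highest score
--     k_th_highest_score = scores[K-1]
--
--     # Count the number of players with the K-th highest score
--     count_k_th_highest = scores.count(k_th_highest_score)
--
--     # Count the number of players with the K-th highest score in the top K players
--     count_in_top_k = 0
--     for i in range(K):
--         if scores[i] == k_th_highest_score:
--             count_in_top_k += 1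
--
--     # Calculate the number of ways to choose the required number of players
--     return math.comb(count_k_th_highest, count_in_top_k)
-- ===== SOURCE B (Python) =====
-- import math
--
-- # Selection by counting instead of sorting: the K-th highest score t is the
-- # smallest distinct score with fewer than K strictly greater scores; the answer
-- # is C(count(t), K - #greater-than-t).  (Does not mutate `scores`, unlike A,
-- # which sorts it in place; equivalence is about the return value.)
-- def max_batting_score_ways(scores, K):
--     if K <= 0:
--         return 1  # nothing to pick: the empty selection is the only way
--     candidates = [v for v in set(scores) if sum(1 for x in scores if x > v) < K]
--     t = min(candidates)
--     greater = sum(1 for x in scores if x > t)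
--     return math.comb(scores.count(t), K - greater)
-- ===== Notes on version B (the rewrite author's own statement) =====
-- stated objective: alternative
-- what changed: B never sorts the scores: it selects the K-th highest score as the minimum distinct score with fewer than K strictly greater scores and computes the answer from single-pass counts of equal and strictly greater elements (with the empty-selection base case for K <= 0). Pre_ excludes only inputs where A raises IndexError (empty scores, K > len(scores), or K < 1-len(scores)).
import Mathlib
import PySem

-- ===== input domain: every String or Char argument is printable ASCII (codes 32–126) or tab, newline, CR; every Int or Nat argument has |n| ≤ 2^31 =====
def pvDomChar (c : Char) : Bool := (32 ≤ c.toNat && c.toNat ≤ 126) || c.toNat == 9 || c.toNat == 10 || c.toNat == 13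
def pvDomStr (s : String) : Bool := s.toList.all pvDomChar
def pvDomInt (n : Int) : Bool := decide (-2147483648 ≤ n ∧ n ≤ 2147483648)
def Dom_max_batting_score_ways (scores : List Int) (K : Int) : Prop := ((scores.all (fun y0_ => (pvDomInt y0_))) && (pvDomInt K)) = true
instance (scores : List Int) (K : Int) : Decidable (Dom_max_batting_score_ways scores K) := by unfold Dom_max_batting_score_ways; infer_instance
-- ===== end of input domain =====

-- B replaces sort-then-index by counting selection of the K-th highest score; return-value
-- equivalence only (A sorts `scores` in place, B does not mutate it).

-- math.comb n k: exact for 0 ≤ n, 0 ≤ k (the only calls reached under Pre_ / by B's algorithm;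
-- Python raises on negative arguments, which Pre_ excludes).
def pyComb (n k : Int) : Int := (Nat.choose n.toNat k.toNat : Int)

-- ===== PORT A =====
def max_batting_score_ways (scores : List Int) (K : Int) : Int :=
  -- scores.sort(reverse=True)
  let s := PySem.List.sorted scores (fun x => x) true
  -- k_th_highest_score = scores[K-1]  (IndexError excluded by Pre_)
  let t := PySem.List.pyGetD s (K - 1) 0
  -- count_k_th_highest = scores.count(k_th_highest_score)
  let c : Int := (PySem.List.count s t : Int)
  -- for i in range(K): if scores[i] == k_th_highest_score: count_in_top_k += 1
  let cin : Int :=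
    (PySem.List.pyRange 0 K 1).foldl
      (fun acc i => if PySem.List.pyGetD s i 0 = t then acc + 1 else acc) 0
  pyComb c cin

-- ===== PORT B =====
def max_batting_score_ways_alt (scores : List Int) (K : Int) : Int :=
  -- if K <= 0: return 1  (nothing to pick: the empty selection is the only way)
  if K ≤ 0 then 1 else
  -- candidates = [v for v in set(scores) if sum(1 for x in scores if x > v) < K]
  -- (a 0/1 generator sum is a countP; min below has no key, so set order is immaterial)
  let candidates := (PySem.Set.ofList scores).filter (fun v => decide ((scores.countP (fun x => decide (v < x)) : Int) < K))
  -- t = min(candidates)   (ValueError on empty candidates, excluded by Pre_)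
  match PySem.List.min? candidates (fun x => x) with
  | none => 0
  | some t =>
    -- greater = sum(1 for x in scores if x > t)
    let g : Int := (scores.countP (fun x => decide (t < x)) : Int)
    -- math.comb(scores.count(t), K - greater)
    pyComb (PySem.List.count scores t : Int) (K - g)

-- ===== PRECONDITION & SPEC =====
-- Pre_ excludes exactly the inputs on which A raises IndexError: empty scores, K > len(scores),
-- or K < 1 - len(scores) (scores[K-1] out of range even after negative-index wraparound).
def Pre_max_batting_score_ways (scores : List Int) (K : Int) : Prop :=
  scores ≠ [] ∧ 1 - (scores.length : Int) ≤ K ∧ K ≤ (scores.length : Int)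
instance (scores : List Int) (K : Int) : Decidable (Pre_max_batting_score_ways scores K) := by
  unfold Pre_max_batting_score_ways; infer_instance

def pvWitness_max_batting_score_ways : List Int × Int := ([3, 1, 3, 2], 2)

def Spec_max_batting_score_ways (scores : List Int) (K : Int) (out : Int) : Prop :=
  out = max_batting_score_ways_alt scores K
instance (scores : List Int) (K : Int) (out : Int) : Decidable (Spec_max_batting_score_ways scores K out) := by
  unfold Spec_max_batting_score_ways; infer_instance

-- ===== CLAIM (what is proved, stated in full; the proofs are below) =====
def Claim_equal_max_batting_score_ways : Prop :=
  ∀ (scores : List Int) (K : Int), Dom_max_batting_score_ways scores K →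
    Pre_max_batting_score_ways scores K →
    Spec_max_batting_score_ways scores K (max_batting_score_ways scores K)

-- ===== LEMMAS AND PROOFS =====

-- A descending (Pairwise ·≥·) list is ≥-monotone in its indices.
theorem pv_desc_getElem {s : List Int} (hp : s.Pairwise (fun a b => b ≤ a))
    {i j : Nat} (hij : i ≤ j) (hj : j < s.length) : s[j] ≤ s[i] := by
  rcases Nat.lt_or_eq_of_le hij with h | h
  · exact (List.pairwise_iff_getElem.mp hp) i j (lt_of_lt_of_le h (Nat.le_of_lt hj)) hj h
  · subst h; exact le_rfl

theorem max_batting_score_ways_spec' :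
    ∀ (scores : List Int) (K : Int), Pre_max_batting_score_ways scores K →
      max_batting_score_ways scores K = max_batting_score_ways_alt scores K := by
  intro scores K hpre
  obtain ⟨hne, hKa, hKb⟩ := hpre
  by_cases hKpos : K ≤ 0
  · -- 1-len ≤ K ≤ 0: A's range(K) loop is empty, so A returns comb(c, 0) = 1; B returns 1.
    unfold max_batting_score_ways max_batting_score_ways_alt
    dsimp only
    rw [if_pos hKpos, PySem.List.pyRange_one_eq_nil hKpos]
    simp [pyComb]
  have hpre : 1 ≤ K ∧ K ≤ (scores.length : Int) := ⟨by omega, hKb⟩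
  obtain ⟨k, rfl⟩ : ∃ k : Nat, K = (k : Int) := ⟨K.toNat, (Int.toNat_of_nonneg (by omega)).symm⟩
  obtain ⟨hk1, hk2⟩ : 1 ≤ k ∧ k ≤ scores.length := by constructor <;> omega
  set s := PySem.List.sorted scores (fun x => x) true with hs
  have hperm : s.Perm scores := PySem.List.sorted_perm scores (fun x => x) true
  have hlen : s.length = scores.length := hperm.length_eq
  have hp : s.Pairwise (fun a b => b ≤ a) := PySem.List.sorted_pairwise_rev scores (fun x => x)
  have hk1l : k - 1 < s.length := by omega
  set t := s[k-1] with hts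
  -- the elements from index k-1 on are ≤ t
  have hdrop : ∀ x ∈ s.drop (k-1), x ≤ t := by
    intro x hx
    rw [List.mem_iff_getElem] at hx
    obtain ⟨i, hi, rfl⟩ := hx
    rw [List.getElem_drop]
    have hi' : (k-1) + i < s.length := by simp [List.length_drop] at hi; omega
    exact pv_desc_getElem hp (Nat.le_add_right _ _) hi'
  -- the first k elements are ≥ t
  have htake : ∀ x ∈ s.take k, t ≤ x := by
    intro x hx
    rw [List.mem_iff_getElem] at hx
    obtain ⟨i, hi, rfl⟩ := hx
    rw [List.getElem_take]
    exact pv_desc_getElem hp (by simp [List.length_take] at hi; omega) (by simp [List.length_take] at hi; omega)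
  have hlen_take : (s.take k).length = k := by simp [List.length_take]; omega
  set g := s.countP (fun x => decide (t < x)) with hg
  have hg_take1 : g = (s.take (k-1)).countP (fun x => decide (t < x)) := by
    conv_lhs => rw [hg, ← List.take_append_drop (k-1) s]
    rw [List.countP_append]
    have h0 : (s.drop (k-1)).countP (fun x => decide (t < x)) = 0 :=
      List.countP_eq_zero.mpr (by intro a ha; simpa using not_lt.mpr (hdrop a ha))
    omega
  have hgk : g ≤ k - 1 := by
    rw [hg_take1]
    calc (s.take (k-1)).countP _ ≤ (s.take (k-1)).length := List.countP_le_length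
    _ ≤ k - 1 := by simp [List.length_take]
  have hg_takek : g = (s.take k).countP (fun x => decide (t < x)) := by
    conv_lhs => rw [hg, ← List.take_append_drop k s]
    rw [List.countP_append]
    have h0 : (s.drop k).countP (fun x => decide (t < x)) = 0 := by
      apply List.countP_eq_zero.mpr
      intro a ha
      have : a ∈ s.drop (k-1) := by
        have := List.drop_subset_drop_left (l := s) (Nat.sub_le k 1)  -- maybe wrong name
        exact this ha
      simpa using not_lt.mpr (hdrop a this)
    omega
  have hcount_take : (s.take k).countP (fun x => decide (x = t)) = k - g := by
    have hsplit := List.length_eq_countP_add_countP (fun x => decide (t < x)) (l := s.take k)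
    have hcongr : (s.take k).countP (fun x => decide (x = t))
        = (s.take k).countP (fun x => decide ¬((fun x => decide (t < x)) x = true)) := by
      apply List.countP_congr
      intro x hx
      have := htake x hx
      simp
      omega
    rw [hcongr, hlen_take] at *
    omega
  -- A's count_in_top_k fold
  have hA_cin : ((PySem.List.pyRange 0 (k:Int) 1).foldl
        (fun acc i => if PySem.List.pyGetD s i 0 = t then acc + 1 else acc) 0)
      = ((k : Int) - (g : Int)) := by
    rw [PySem.List.pyRange_zero_nat k, List.foldl_map]
    simp only [PySem.List.pyGetD_natCast]
    rw [← List.foldl_map (f := fun i => s.getD i 0)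
        (g := fun acc x => if x = t then acc + 1 else acc)]
    rw [PySem.List.foldl_ite_add_one (fun x => x = t)]
    have hmap : (List.range k).map (fun i => s.getD i 0) = s.take k := by
      apply List.ext_getElem
      · simp [hlen_take]
      · intro i h1 h2
        simp only [List.getElem_map, List.getElem_range, List.getElem_take]
        exact List.getD_eq_getElem s 0 (by simp at h1; omega)
    rw [hmap, hcount_take]
    have : ((k - g : Nat) : Int) = (k : Int) - (g : Int) := by omega
    rw [this]; ring
  -- B's selected minimum is t
  have hts_mem : t ∈ scores := hperm.mem_iff.mp (List.getElem_mem hk1l)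
  set candidates := (PySem.Set.ofList scores).filter (fun v => decide ((scores.countP (fun x => decide (v < x)) : Int) < (k:Int))) with hcand
  have hcountP_eq : ∀ p : Int → Bool, scores.countP p = s.countP p := fun p => (hperm.countP_eq p).symm
  have ht_cand : t ∈ candidates := by
    rw [hcand, List.mem_filter]
    refine ⟨(PySem.Set.mem_ofList scores t).mpr hts_mem, ?_⟩
    rw [hcountP_eq]
    simp only [decide_eq_true_eq]
    rw [← hg]
    omega
  have hlb : ∀ v ∈ candidates, t ≤ v := by
    intro v hv
    rcases List.mem_filter.mp hv with ⟨hvs, hvp⟩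
    by_contra hcon
    push Not at hcon
    have hall : (s.take k).countP (fun x => decide (v < x)) = k := by
      rw [List.countP_eq_length.mpr, hlen_take]
      intro a ha
      simpa using lt_of_lt_of_le hcon (htake a ha)
    have hle : (s.take k).countP (fun x => decide (v < x)) ≤ s.countP (fun x => decide (v < x)) := by
      conv_rhs => rw [← List.take_append_drop k s]
      rw [List.countP_append]; omega
    rw [hcountP_eq] at hvp
    simp only [decide_eq_true_eq] at hvp
    omega
  have hmin : PySem.List.min? candidates (fun x => x) = some t := by
    cases h : PySem.List.min? candidates (fun x => x) with
    | none =>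
      rw [PySem.List.min?_eq_none_iff] at h
      rw [h] at ht_cand; simp at ht_cand
    | some m =>
      have h1 : m ≤ t := PySem.List.min?_isMin h t ht_cand
      have h2 : t ≤ m := hlb m (PySem.List.min?_mem h)
      rw [le_antisymm h1 h2]
  -- assemble
  show max_batting_score_ways scores (k:Int) = max_batting_score_ways_alt scores (k:Int)
  unfold max_batting_score_ways max_batting_score_ways_alt
  dsimp only
  rw [if_neg (by omega : ¬ (k:Int) ≤ 0), ← hs, ← hcand, hmin]
  have htA : PySem.List.pyGetD s ((k:Int) - 1) 0 = t := by
    have : ((k:Int) - 1) = ((k-1 : Nat) : Int) := by omega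
    rw [this, PySem.List.pyGetD_natCast, List.getD_eq_getElem s 0 hk1l]
  rw [htA]
  simp only [hA_cin]
  rw [PySem.List.count_eq, PySem.List.count_eq, hperm.count_eq t]
  rw [hcountP_eq, ← hg]

-- ===== VERDICT (by name: the statement is the Claim_ definition above) =====
theorem max_batting_score_ways_spec : Claim_equal_max_batting_score_ways := by
  intro scores K _ hpre
  exact max_batting_score_ways_spec' scores K hpre
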